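-- pv_equiv track=rewrite | github.com/4d4mszweda/study | machine_learning/labirint.py | get_path_from_solution
-- ===== SOURCE A (Python) =====
-- def get_path_from_solution(solution, start):
--     x, y = start
--     path = [(x, y)]
--     for move in solution:
--         if move == 0:  # Góra
--             x -= 1
--         elif move == 1:  # Dół
--             x += 1
--         elif move == 2:  # Lewo
--             y -= 1
--         elif move == 3:  # Prawo
--             y += 1
--         path.append((x, y))
--     return path
-- ===== SOURCE B (Python) =====
-- def get_path_from_solution(solution, start):
--     # Axis-decomposed: the x- and y-coordinate sequences are computed in two
--     # independent passes (branch-free boolean-arithmetic deltas), then zipped.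
--     xs = [start[0]]
--     for m in solution:
--         xs.append(xs[-1] + ((m == 1) - (m == 0)))
--     ys = [start[1]]
--     for m in solution:
--         ys.append(ys[-1] + ((m == 3) - (m == 2)))
--     return list(zip(xs, ys))
-- ===== Notes on version B (the rewrite author's own statement) =====
-- stated objective: alternative
-- what changed: Decomposes the problem by axis: instead of one fused loop threading an (x,y) pair through an if/elif chain, B computes the x-coordinate sequence and the y-coordinate sequence in two independent passes using branch-free boolean-arithmetic deltas ((m==1)-(m==0), (m==3)-(m==2)) and zips them into the path.
import Mathlib
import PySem

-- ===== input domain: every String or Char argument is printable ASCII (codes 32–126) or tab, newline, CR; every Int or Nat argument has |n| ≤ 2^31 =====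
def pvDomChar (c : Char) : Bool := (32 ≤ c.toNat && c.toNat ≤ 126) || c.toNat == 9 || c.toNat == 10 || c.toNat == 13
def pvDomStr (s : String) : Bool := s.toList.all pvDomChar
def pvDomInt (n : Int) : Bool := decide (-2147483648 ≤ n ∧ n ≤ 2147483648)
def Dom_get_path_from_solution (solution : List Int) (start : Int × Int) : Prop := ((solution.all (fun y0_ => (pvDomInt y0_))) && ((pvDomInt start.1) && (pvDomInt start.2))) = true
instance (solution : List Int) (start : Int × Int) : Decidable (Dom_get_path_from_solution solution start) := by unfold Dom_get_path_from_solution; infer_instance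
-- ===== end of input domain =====

-- B decomposes the problem by axis: two independent coordinate passes with
-- branch-free boolean-arithmetic deltas, zipped into the path (alternative decomposition, same cost).

-- ===== PORT A =====
def get_path_from_solution (solution : List Int) (start : Int × Int) : List (Int × Int) :=
  (solution.foldl
    (fun (st : Int × Int × List (Int × Int)) move =>
      let x := st.1
      let y := st.2.1
      let path := st.2.2
      let xy : Int × Int :=
        if move = 0 then (x - 1, y)
        else if move = 1 then (x + 1, y)
        else if move = 2 then (x, y - 1)
        else if move = 3 then (x, y + 1)
        else (x, y)
      (xy.1, xy.2, path ++ [xy]))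
    (start.1, start.2, [(start.1, start.2)])).2.2

-- ===== PORT B =====
def get_path_from_solution_alt (solution : List Int) (start : Int × Int) : List (Int × Int) :=
  let xs := solution.foldl
    (fun (xs : List Int) m =>
      xs ++ [((PySem.List.pyGet? xs (-1)).getD 0) +
        ((if m = 1 then (1 : Int) else 0) - (if m = 0 then 1 else 0))])
    [start.1]
  let ys := solution.foldl
    (fun (ys : List Int) m =>
      ys ++ [((PySem.List.pyGet? ys (-1)).getD 0) +
        ((if m = 3 then (1 : Int) else 0) - (if m = 2 then 1 else 0))])
    [start.2]
  xs.zip ys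

-- ===== PRECONDITION & SPEC =====
def Spec_get_path_from_solution (solution : List Int) (start : Int × Int) (out : List (Int × Int)) : Prop := out = get_path_from_solution_alt solution start
instance (solution : List Int) (start : Int × Int) (out : List (Int × Int)) : Decidable (Spec_get_path_from_solution solution start out) := by unfold Spec_get_path_from_solution; infer_instance

-- ===== CLAIM (what is proved, stated in full; the proofs are below) =====
def Claim_equal_get_path_from_solution : Prop := ∀ (solution : List Int) (start : Int × Int), Dom_get_path_from_solution solution start → Spec_get_path_from_solution solution start (get_path_from_solution solution start)

-- ===== LEMMAS AND PROOFS =====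

-- reference scans used only by the proofs
def pvScan (ms : List Int) (x y : Int) : List (Int × Int) :=
  match ms with
  | [] => [(x, y)]
  | m :: ms =>
      (x, y) :: pvScan ms (x + ((if m = 1 then (1 : Int) else 0) - (if m = 0 then 1 else 0)))
                         (y + ((if m = 3 then (1 : Int) else 0) - (if m = 2 then 1 else 0)))

def pvScan1 (dx1 dx0 : Int) (ms : List Int) (x : Int) : List Int :=
  match ms with
  | [] => [x]
  | m :: ms =>
      x :: pvScan1 dx1 dx0 ms (x + ((if m = dx1 then (1 : Int) else 0) - (if m = dx0 then 1 else 0)))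

theorem pvA_eq_scan (ms : List Int) (x y : Int) (q : List (Int × Int)) :
    (ms.foldl
      (fun (st : Int × Int × List (Int × Int)) move =>
        let x := st.1
        let y := st.2.1
        let path := st.2.2
        let xy : Int × Int :=
          if move = 0 then (x - 1, y)
          else if move = 1 then (x + 1, y)
          else if move = 2 then (x, y - 1)
          else if move = 3 then (x, y + 1)
          else (x, y)
        (xy.1, xy.2, path ++ [xy]))
      (x, y, q ++ [(x, y)])).2.2 = q ++ pvScan ms x y := by
  induction ms generalizing x y q with
  | nil => simp [pvScan]
  | cons m ms ih =>
    simp only [List.foldl_cons, pvScan]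
    have hstep :
        (if m = 0 then ((x - 1 : Int), y)
         else if m = 1 then (x + 1, y)
         else if m = 2 then (x, y - 1)
         else if m = 3 then (x, y + 1)
         else (x, y))
        = (x + ((if m = 1 then (1 : Int) else 0) - (if m = 0 then 1 else 0)),
           y + ((if m = 3 then (1 : Int) else 0) - (if m = 2 then 1 else 0))) := by
      split_ifs <;> simp_all <;> omega
    simp only [hstep]
    have := ih (x + ((if m = 1 then (1 : Int) else 0) - (if m = 0 then 1 else 0)))
               (y + ((if m = 3 then (1 : Int) else 0) - (if m = 2 then 1 else 0)))
               (q ++ [(x, y)])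
    simpa [List.append_assoc] using this

theorem pvB_eq_scan1 (dx1 dx0 : Int) (ms : List Int) (x : Int) (q : List Int) :
    ms.foldl
      (fun (xs : List Int) m =>
        xs ++ [((PySem.List.pyGet? xs (-1)).getD 0) +
          ((if m = dx1 then (1 : Int) else 0) - (if m = dx0 then 1 else 0))])
      (q ++ [x]) = q ++ pvScan1 dx1 dx0 ms x := by
  induction ms generalizing x q with
  | nil => simp [pvScan1]
  | cons m ms ih =>
    simp only [List.foldl_cons, pvScan1]
    rw [PySem.List.pyGet?_neg_one_append_singleton]
    simp only [Option.getD_some]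
    have := ih (x + ((if m = dx1 then (1 : Int) else 0) - (if m = dx0 then 1 else 0))) (q ++ [x])
    simpa [List.append_assoc] using this

theorem pvZip_scan (ms : List Int) (x y : Int) :
    (pvScan1 1 0 ms x).zip (pvScan1 3 2 ms y) = pvScan ms x y := by
  induction ms generalizing x y with
  | nil => simp [pvScan1, pvScan]
  | cons m ms ih => simp [pvScan1, pvScan, ih]

-- ===== VERDICT (by name: the statement is the Claim_ definition above) =====
theorem get_path_from_solution_spec : Claim_equal_get_path_from_solution := by
  intro solution start _
  unfold Spec_get_path_from_solution get_path_from_solution get_path_from_solution_alt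
  have hA := pvA_eq_scan solution start.1 start.2 []
  have hx := pvB_eq_scan1 1 0 solution start.1 []
  have hy := pvB_eq_scan1 3 2 solution start.2 []
  simp only [List.nil_append] at hA hx hy
  rw [hA, hx, hy, pvZip_scan]
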